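-- pv_equiv track=rewrite | github.com/facebookresearch/luckmatters | ssl/real-dataset/modular_addition.py | generate_dataset2
-- ===== SOURCE A (Python) =====
-- def modular_addition(x, y, mod):
--     return (x + y) % mod
--
-- def generate_dataset2(M1, M2):
--     data = []
--     for x1 in range(M1):
--         for y1 in range(M1):
--             z1 = modular_addition(x1, y1, M1)
--             for x2 in range(M2):
--                 for y2 in range(M2):
--                     z2 = modular_addition(x2, y2, M2)
--                     data.append(((x1, x2, y1, y2, z1, z2), (x1 * M2 + x2, y1 * M2 + y2, z1 * M2 + z2)))
--     return data
-- ===== SOURCE B (Python) =====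
-- def generate_dataset2(M1, M2):
--     # Flat enumeration: decode a single index k in range(M1^2 * M2^2) into
--     # (x1, y1, x2, y2) by repeated division instead of four nested loops.
--     if M1 < 0 or M2 < 0:
--         return []  # a negative modulus means an empty range, hence no rows
--     data = []
--     for k in range(M1 * M1 * M2 * M2):
--         y2 = k % M2
--         r = k // M2
--         x2 = r % M2
--         r = r // M2
--         y1 = r % M1
--         x1 = r // M1
--         z1 = (x1 + y1) % M1
--         z2 = (x2 + y2) % M2
--         data.append(((x1, x2, y1, y2, z1, z2),
--                      (x1 * M2 + x2, y1 * M2 + y2, z1 * M2 + z2)))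
--     return data
-- ===== Notes on version B (the rewrite author's own statement) =====
-- stated objective: alternative
-- what changed: B replaces A's four nested loops by a single flat loop over one index k in range(M1^2*M2^2), decoding (x1,y1,x2,y2) from k by repeated division/modulus (mixed-radix decoding) before emitting the same row.
import Mathlib
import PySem

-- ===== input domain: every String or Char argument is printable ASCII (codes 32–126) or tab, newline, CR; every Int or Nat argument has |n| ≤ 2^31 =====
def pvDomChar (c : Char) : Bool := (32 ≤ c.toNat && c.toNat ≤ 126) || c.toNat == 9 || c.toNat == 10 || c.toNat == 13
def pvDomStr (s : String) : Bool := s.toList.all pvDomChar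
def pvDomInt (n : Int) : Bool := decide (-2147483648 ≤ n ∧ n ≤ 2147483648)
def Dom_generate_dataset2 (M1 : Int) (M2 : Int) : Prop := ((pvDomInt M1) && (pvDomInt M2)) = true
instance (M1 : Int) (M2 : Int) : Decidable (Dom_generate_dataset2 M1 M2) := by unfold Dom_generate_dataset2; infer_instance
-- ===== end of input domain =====

-- B replaces A's four nested loops by one flat loop over a single index that is
-- decoded into (x1, y1, x2, y2) by repeated division/modulus (mixed-radix decoding).

-- ===== PORT A =====
def modular_addition (x y m : Int) : Int := PySem.Int.mod (x + y) m

def generate_dataset2 (M1 : Int) (M2 : Int) : List ((Int × Int × Int × Int × Int × Int) × (Int × Int × Int)) :=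
  (PySem.List.pyRange 0 M1 1).foldl (fun data x1 =>
    (PySem.List.pyRange 0 M1 1).foldl (fun data y1 =>
      let z1 := modular_addition x1 y1 M1
      (PySem.List.pyRange 0 M2 1).foldl (fun data x2 =>
        (PySem.List.pyRange 0 M2 1).foldl (fun data y2 =>
          let z2 := modular_addition x2 y2 M2
          data ++ [((x1, x2, y1, y2, z1, z2), (x1 * M2 + x2, y1 * M2 + y2, z1 * M2 + z2))]) data) data) data) []

-- ===== PORT B =====
def generate_dataset2_alt (M1 : Int) (M2 : Int) : List ((Int × Int × Int × Int × Int × Int) × (Int × Int × Int)) :=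
  if M1 < 0 ∨ M2 < 0 then [] else
  (PySem.List.pyRange 0 (M1 * M1 * M2 * M2) 1).foldl (fun data k =>
    let y2 := PySem.Int.mod k M2
    let r := PySem.Int.floordiv k M2
    let x2 := PySem.Int.mod r M2
    let r := PySem.Int.floordiv r M2
    let y1 := PySem.Int.mod r M1
    let x1 := PySem.Int.floordiv r M1
    let z1 := PySem.Int.mod (x1 + y1) M1
    let z2 := PySem.Int.mod (x2 + y2) M2
    data ++ [((x1, x2, y1, y2, z1, z2), (x1 * M2 + x2, y1 * M2 + y2, z1 * M2 + z2))]) []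

-- ===== PRECONDITION & SPEC =====
def Spec_generate_dataset2 (M1 : Int) (M2 : Int) (out : List ((Int × Int × Int × Int × Int × Int) × (Int × Int × Int))) : Prop := out = generate_dataset2_alt M1 M2
instance (M1 : Int) (M2 : Int) (out : List ((Int × Int × Int × Int × Int × Int) × (Int × Int × Int))) : Decidable (Spec_generate_dataset2 M1 M2 out) := by
  unfold Spec_generate_dataset2
  exact @instDecidableEqList _ (fun a b => @instDecidableEqProd _ _ (by infer_instance) (by infer_instance) a b) out (generate_dataset2_alt M1 M2)

-- ===== CLAIM (what is proved, stated in full; the proofs are below) =====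
def Claim_equal_generate_dataset2 : Prop := ∀ (M1 : Int) (M2 : Int), Dom_generate_dataset2 M1 M2 → Spec_generate_dataset2 M1 M2 (generate_dataset2 M1 M2)

-- ===== LEMMAS AND PROOFS =====

-- flatMap respects pointwise equality on members
lemma pv_flatMap_congr_mem {α β : Type} {l : List α} {f g : α → List β}
    (h : ∀ x ∈ l, f x = g x) : l.flatMap f = l.flatMap g := by
  induction l with
  | nil => rfl
  | cons a t ih =>
    simp only [List.flatMap_cons]
    rw [h a (by simp), ih (fun x hx => h x (by simp [hx]))]

-- mixed-radix split of a flat range: range(a*b) = Σ_{i<a} { i*b + j : j < b }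
lemma pv_pyRange_mul_flatMap {α : Type} (b : Int) (hb : 0 < b) (f : Int → List α) :
    ∀ a : Int, 0 ≤ a →
      (PySem.List.pyRange 0 (a * b) 1).flatMap f =
      (PySem.List.pyRange 0 a 1).flatMap (fun i =>
        (PySem.List.pyRange 0 b 1).flatMap (fun j => f (i * b + j))) := by
  intro a ha
  induction a, ha using Int.le_induction with
  | base => simp [PySem.List.pyRange_one_eq_nil]
  | succ a ha ih =>
    rw [show (a + 1) * b = a * b + b by ring,
        PySem.List.pyRange_one_append 0 (a * b) (a * b + b) (by positivity) (by omega),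
        List.flatMap_append, ih,
        show a + 1 = a + 1 from rfl,
        PySem.List.pyRange_one_succ_right ha,
        List.flatMap_append]
    congr 1
    simp [PySem.List.pyRange_one, List.flatMap_map]

lemma pv_pyRange_mul_map {α : Type} (b : Int) (hb : 0 < b) (f : Int → α)
    (a : Int) (ha : 0 ≤ a) :
    (PySem.List.pyRange 0 (a * b) 1).map f =
    (PySem.List.pyRange 0 a 1).flatMap (fun i =>
      (PySem.List.pyRange 0 b 1).map (fun j => f (i * b + j))) := by
  simp only [List.map_eq_flatMap]
  exact pv_pyRange_mul_flatMap b hb (fun k => [f k]) a ha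

lemma pv_decode_mod (i j b : Int) (hb : 0 < b) (h0 : 0 ≤ j) (h1 : j < b) :
    PySem.Int.mod (i * b + j) b = j := by
  rw [PySem.Int.mod_eq_emod_of_pos hb, add_comm, mul_comm, Int.add_mul_emod_self_left,
      Int.emod_eq_of_lt h0 h1]

lemma pv_decode_div (i j b : Int) (hb : 0 < b) (h0 : 0 ≤ j) (h1 : j < b) :
    PySem.Int.floordiv (i * b + j) b = i := by
  rw [PySem.Int.floordiv_eq_ediv_of_pos hb, add_comm,
      Int.add_mul_ediv_right _ _ (ne_of_gt hb), Int.ediv_eq_zero_of_lt h0 h1]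
  ring

-- one row of the dataset (proof-side abbreviation)
def pvRow (M1 M2 x1 y1 x2 y2 : Int) : (Int × Int × Int × Int × Int × Int) × (Int × Int × Int) :=
  ((x1, x2, y1, y2, PySem.Int.mod (x1 + y1) M1, PySem.Int.mod (x2 + y2) M2),
   (x1 * M2 + x2, y1 * M2 + y2,
    (PySem.Int.mod (x1 + y1) M1) * M2 + PySem.Int.mod (x2 + y2) M2))

-- one mixed-radix split step, map form
lemma pv_split_map {α : Type} (b : Int) (hb : 0 < b) (a : Int) (ha : 0 ≤ a)
    (h : Int → Int → α) :
    (PySem.List.pyRange 0 (a * b) 1).map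
        (fun k => h (PySem.Int.floordiv k b) (PySem.Int.mod k b)) =
    (PySem.List.pyRange 0 a 1).flatMap (fun i =>
      (PySem.List.pyRange 0 b 1).map (fun j => h i j)) := by
  rw [pv_pyRange_mul_map b hb _ a ha]
  apply pv_flatMap_congr_mem
  intro i _
  apply List.map_congr_left
  intro j hj
  have hjb := PySem.List.mem_pyRange_one.mp hj
  simp [pv_decode_div i j b hb hjb.1 hjb.2, pv_decode_mod i j b hb hjb.1 hjb.2]

-- one mixed-radix split step, flatMap form
lemma pv_split_flatMap {α : Type} (b : Int) (hb : 0 < b) (a : Int) (ha : 0 ≤ a)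
    (h : Int → Int → List α) :
    (PySem.List.pyRange 0 (a * b) 1).flatMap
        (fun k => h (PySem.Int.floordiv k b) (PySem.Int.mod k b)) =
    (PySem.List.pyRange 0 a 1).flatMap (fun i =>
      (PySem.List.pyRange 0 b 1).flatMap (fun j => h i j)) := by
  rw [pv_pyRange_mul_flatMap b hb _ a ha]
  apply pv_flatMap_congr_mem
  intro i _
  apply pv_flatMap_congr_mem
  intro j hj
  have hjb := PySem.List.mem_pyRange_one.mp hj
  simp [pv_decode_div i j b hb hjb.1 hjb.2, pv_decode_mod i j b hb hjb.1 hjb.2]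

-- A in flatMap normal form
lemma pv_A_nf (M1 M2 : Int) :
    generate_dataset2 M1 M2 =
    (PySem.List.pyRange 0 M1 1).flatMap (fun x1 =>
      (PySem.List.pyRange 0 M1 1).flatMap (fun y1 =>
        (PySem.List.pyRange 0 M2 1).flatMap (fun x2 =>
          (PySem.List.pyRange 0 M2 1).map (fun y2 => pvRow M1 M2 x1 y1 x2 y2)))) := by
  unfold generate_dataset2 modular_addition pvRow
  simp only [PySem.List.foldl_append_singleton_eq_map, PySem.List.foldl_append_eq_flatMap,
    List.nil_append]

-- ===== VERDICT (by name: the statement is the Claim_ definition above) =====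
theorem generate_dataset2_spec : Claim_equal_generate_dataset2 := by
  intro M1 M2 _
  unfold Spec_generate_dataset2
  rw [pv_A_nf]
  unfold generate_dataset2_alt
  by_cases hneg : M1 < 0 ∨ M2 < 0
  · rw [if_pos hneg]
    rcases hneg with h | h
    · simp [PySem.List.pyRange_one_eq_nil (by omega : M1 ≤ 0)]
    · simp [PySem.List.pyRange_one_eq_nil (by omega : M2 ≤ 0)]
  · rw [if_neg hneg]
    push Not at hneg
    obtain ⟨h1, h2⟩ := hneg
    by_cases hz : M1 = 0 ∨ M2 = 0
    · rcases hz with h | h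
      · subst h
        simp [PySem.List.pyRange_one_eq_nil]
      · subst h
        simp [PySem.List.pyRange_one_eq_nil]
    · push Not at hz
      have hM1 : 0 < M1 := lt_of_le_of_ne h1 (Ne.symm hz.1)
      have hM2 : 0 < M2 := lt_of_le_of_ne h2 (Ne.symm hz.2)
      rw [PySem.List.foldl_append_singleton_eq_map, List.nil_append]
      symm
      calc
        (PySem.List.pyRange 0 (M1 * M1 * M2 * M2) 1).map (fun k =>
            pvRow M1 M2
              (PySem.Int.floordiv (PySem.Int.floordiv (PySem.Int.floordiv k M2) M2) M1)
              (PySem.Int.mod (PySem.Int.floordiv (PySem.Int.floordiv k M2) M2) M1)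
              (PySem.Int.mod (PySem.Int.floordiv k M2) M2)
              (PySem.Int.mod k M2))
          = (PySem.List.pyRange 0 (M1 * M1 * M2) 1).flatMap (fun r =>
              (PySem.List.pyRange 0 M2 1).map (fun y2 =>
                pvRow M1 M2
                  (PySem.Int.floordiv (PySem.Int.floordiv r M2) M1)
                  (PySem.Int.mod (PySem.Int.floordiv r M2) M1)
                  (PySem.Int.mod r M2) y2)) :=
          pv_split_map M2 hM2 (M1 * M1 * M2) (by positivity) (fun r y2 =>
            pvRow M1 M2
              (PySem.Int.floordiv (PySem.Int.floordiv r M2) M1)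
              (PySem.Int.mod (PySem.Int.floordiv r M2) M1)
              (PySem.Int.mod r M2) y2)
        _ = (PySem.List.pyRange 0 (M1 * M1) 1).flatMap (fun p =>
              (PySem.List.pyRange 0 M2 1).flatMap (fun x2 =>
                (PySem.List.pyRange 0 M2 1).map (fun y2 =>
                  pvRow M1 M2 (PySem.Int.floordiv p M1) (PySem.Int.mod p M1) x2 y2))) :=
          pv_split_flatMap M2 hM2 (M1 * M1) (by positivity) (fun p x2 =>
            (PySem.List.pyRange 0 M2 1).map (fun y2 =>
              pvRow M1 M2 (PySem.Int.floordiv p M1) (PySem.Int.mod p M1) x2 y2))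
        _ = (PySem.List.pyRange 0 M1 1).flatMap (fun x1 =>
              (PySem.List.pyRange 0 M1 1).flatMap (fun y1 =>
                (PySem.List.pyRange 0 M2 1).flatMap (fun x2 =>
                  (PySem.List.pyRange 0 M2 1).map (fun y2 => pvRow M1 M2 x1 y1 x2 y2)))) :=
          pv_split_flatMap M1 hM1 M1 hM1.le (fun x1 y1 =>
            (PySem.List.pyRange 0 M2 1).flatMap (fun x2 =>
              (PySem.List.pyRange 0 M2 1).map (fun y2 => pvRow M1 M2 x1 y1 x2 y2)))
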